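-- pv_equiv track=rewrite | github.com/pypi-data/pypi-mirror-397 | packages/chloros-sdk/chloros_sdk-1.0.0.tar.gz/chloros_sdk-1.0.0/cleanup_console_logs.py | find_statement_end
-- ===== SOURCE A (Python) =====
-- def find_statement_end(content, start_pos):
--     """Find the end of a console statement, handling nested parentheses"""
--     paren_count = 0
--     in_string = False
--     string_char = None
--     escape_next = False
--     i = start_pos
--
--     while i < len(content):
--         char = content[i]
--
--         if escape_next:
--             escape_next = False
--             i += 1
--             continue
--
--         if char == '\\':
--             escape_next = True
--             i += 1
--             continue
--
--         if char in ['"', "'", '`'] and not in_string: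
--             in_string = True
--             string_char = char
--         elif char == string_char and in_string:
--             in_string = False
--             string_char = None
--         elif char == '(' and not in_string:
--             paren_count += 1
--         elif char == ')' and not in_string:
--             paren_count -= 1
--             if paren_count == 0:
--                 # Find the semicolon or end of line
--                 j = i + 1
--                 while j < len(content) and content[j] in [' ', '\t']:
--                     j += 1
--                 if j < len(content) and content[j] == ';':
--                     return j + 1
--                 return i + 1
--
--         i += 1
--
--     return i
-- ===== SOURCE B (Python) =====
-- def find_statement_end(content, start_pos):
--     """Find the end of a console statement, handling nested parentheses."""
--     n = len(content)
--     paren = 0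
--     i = start_pos
--     while i < n:
--         c = content[i]
--         i += 1
--         if c == '\\':
--             if i < n:
--                 i += 1  # skip the escaped character
--             continue
--         if c in '"\'`':
--             # consume the string literal up to its matching closing quote
--             while i < n:
--                 d = content[i]
--                 i += 1
--                 if d == '\\':
--                     if i < n:
--                         i += 1
--                 elif d == c:
--                     break
--             continue
--         if c == '(':
--             paren += 1
--         elif c == ')':
--             paren -= 1
--             if paren == 0:
--                 j = i
--                 while j < n and content[j] in ' \t':
--                     j += 1
--                 if j < n and content[j] == ';':
--                     return j + 1
--                 return i
--     return i
-- ===== Notes on version B (the rewrite author's own statement) =====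
-- stated objective: simpler
-- what changed: A's single flat loop over five state variables (paren_count, in_string, string_char, escape_next) is replaced by an outer loop tracking only the paren counter, with string literals consumed by a dedicated inner loop and escapes handled by skipping the next index, so the string/escape state variables and their per-character branch tests disappear.
import Mathlib
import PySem

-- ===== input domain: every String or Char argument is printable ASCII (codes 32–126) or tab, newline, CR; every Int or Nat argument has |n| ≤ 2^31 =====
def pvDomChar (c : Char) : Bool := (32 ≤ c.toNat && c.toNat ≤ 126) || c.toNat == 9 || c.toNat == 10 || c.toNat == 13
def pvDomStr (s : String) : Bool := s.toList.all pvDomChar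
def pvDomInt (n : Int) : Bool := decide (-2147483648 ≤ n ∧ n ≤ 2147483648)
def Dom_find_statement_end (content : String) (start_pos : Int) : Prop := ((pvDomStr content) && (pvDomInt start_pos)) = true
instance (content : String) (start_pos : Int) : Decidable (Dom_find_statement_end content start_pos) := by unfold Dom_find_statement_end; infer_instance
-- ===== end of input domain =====

-- B replaces A's flat five-variable state machine with an outer loop that tracks only the paren
-- counter, consuming string literals in a dedicated inner loop; same return value on all
-- non-raising inputs (neither version mutates its arguments). Loops are ported with a fuel
-- parameter = remaining scan length (a totality guard only: each loop advances its index by ≥ 1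
-- per fuel unit, so the fuel never runs out before the Python loop condition fails).

-- ===== PORT A =====

-- A's whitespace scan: `j = i+1; while j < len and content[j] in [' ','\t']: j += 1`
-- (the `none` branch is Python's IndexError, unreachable when -len ≤ j)
def pvLoopJ (cs : List Char) (n : Int) : Nat → Int → Int
  | 0, j => j
  | fuel + 1, j =>
    if j < n then
      match PySem.List.pyGet? cs j with
      | none => j
      | some c => if c = ' ' ∨ c = '\t' then pvLoopJ cs n fuel (j + 1) else j
    else j

-- A's main loop, step for step over A's state (paren_count, in_string, string_char, escape_next, i);
-- `none` = IndexError (excluded by Pre_)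
def pvLoopA (cs : List Char) (n : Int) : Nat → Int → Bool → Option Char → Bool → Int → Int
  | 0, _, _, _, _, i => i
  | fuel + 1, paren, instr, schar, esc, i =>
    if i < n then
      match PySem.List.pyGet? cs i with
      | none => 0
      | some c =>
        if esc then pvLoopA cs n fuel paren instr schar false (i + 1)
        else if c = '\\' then pvLoopA cs n fuel paren instr schar true (i + 1)
        else if (c = '"' ∨ c = '\'' ∨ c = '`') ∧ instr = false then
          pvLoopA cs n fuel paren true (some c) false (i + 1)
        else if some c = schar ∧ instr = true then
          pvLoopA cs n fuel paren false none false (i + 1)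
        else if c = '(' ∧ instr = false then
          pvLoopA cs n fuel (paren + 1) instr schar false (i + 1)
        else if c = ')' ∧ instr = false then
          if paren - 1 = 0 then
            let j := pvLoopJ cs n (n - (i + 1)).toNat (i + 1)
            if j < n ∧ PySem.List.pyGet? cs j = some ';' then j + 1 else i + 1
          else pvLoopA cs n fuel (paren - 1) instr schar false (i + 1)
        else pvLoopA cs n fuel paren instr schar false (i + 1)
    else i

def find_statement_end (content : String) (start_pos : Int) : Int :=
  pvLoopA content.toList (content.toList.length : Int)
    ((content.toList.length - start_pos).toNat) 0 false none false start_pos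

-- ===== PORT B =====

-- B's inner string-literal loop: consume up to the matching quote q, honoring backslash skips
def pvStrLoop (cs : List Char) (n : Int) (q : Char) : Nat → Int → Int
  | 0, i => i
  | fuel + 1, i =>
    if i < n then
      match PySem.List.pyGet? cs i with
      | none => i + 1
      | some d =>
        if d = '\\' then pvStrLoop cs n q fuel (if i + 1 < n then i + 2 else i + 1)
        else if d = q then i + 1
        else pvStrLoop cs n q fuel (i + 1)
    else i

-- B's whitespace scan: `while j < n and content[j] in ' \t': j += 1`
def pvWs (cs : List Char) (n : Int) : Nat → Int → Int
  | 0, j => j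
  | fuel + 1, j =>
    if j < n then
      match PySem.List.pyGet? cs j with
      | none => j
      | some c => if c = ' ' ∨ c = '\t' then pvWs cs n fuel (j + 1) else j
    else j

-- B's outer loop: only the paren counter and the index
def pvLoopB (cs : List Char) (n : Int) : Nat → Int → Int → Int
  | 0, _, i => i
  | fuel + 1, paren, i =>
    if i < n then
      match PySem.List.pyGet? cs i with
      | none => 0
      | some c =>
        if c = '\\' then pvLoopB cs n fuel paren (if i + 1 < n then i + 2 else i + 1)
        else if c = '"' ∨ c = '\'' ∨ c = '`' then
          pvLoopB cs n fuel paren (pvStrLoop cs n c (n - (i + 1)).toNat (i + 1))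
        else if c = '(' then pvLoopB cs n fuel (paren + 1) (i + 1)
        else if c = ')' then
          if paren - 1 = 0 then
            let j := pvWs cs n (n - (i + 1)).toNat (i + 1)
            if j < n ∧ PySem.List.pyGet? cs j = some ';' then j + 1 else i + 1
          else pvLoopB cs n fuel (paren - 1) (i + 1)
        else pvLoopB cs n fuel paren (i + 1)
    else i

def find_statement_end_alt (content : String) (start_pos : Int) : Int :=
  pvLoopB content.toList (content.toList.length : Int)
    ((content.toList.length - start_pos).toNat) 0 start_pos

-- ===== PRECONDITION & SPEC =====
-- Pre_ excludes exactly start_pos < -len(content), where content[start_pos] raises IndexError in A (and in B).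
def Pre_find_statement_end (content : String) (start_pos : Int) : Prop :=
  -(content.toList.length : Int) ≤ start_pos
instance (content : String) (start_pos : Int) : Decidable (Pre_find_statement_end content start_pos) := by
  unfold Pre_find_statement_end; infer_instance

def pvWitness_find_statement_end : String × Int := ("console.log( 'a(b' ) ;x", 8)

def Spec_find_statement_end (content : String) (start_pos : Int) (out : Int) : Prop := out = find_statement_end_alt content start_pos
instance (content : String) (start_pos : Int) (out : Int) : Decidable (Spec_find_statement_end content start_pos out) := by unfold Spec_find_statement_end; infer_instance

-- ===== CLAIM (what is proved, stated in full; the proofs are below) =====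
def Claim_equal_find_statement_end : Prop := ∀ (content : String) (start_pos : Int), Dom_find_statement_end content start_pos → Pre_find_statement_end content start_pos → Spec_find_statement_end content start_pos (find_statement_end content start_pos)

-- ===== LEMMAS AND PROOFS =====

-- in range, pyGet? succeeds
theorem pvGetSome (cs : List Char) (i : Int) (h1 : -(cs.length : Int) ≤ i)
    (h2 : i < (cs.length : Int)) : ∃ c, PySem.List.pyGet? cs i = some c := by
  cases hg : PySem.List.pyGet? cs i with
  | some c => exact ⟨c, rfl⟩
  | none =>
      rw [PySem.List.pyGet?_eq_none_iff] at hg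
      exact absurd ⟨h1, h2⟩ hg

-- loop-exit lemmas: once the index is past the end, every loop returns it, whatever the fuel
theorem pvStopA (cs : List Char) (n : Int) (fuel : Nat) (paren : Int) (instr : Bool)
    (schar : Option Char) (esc : Bool) (i : Int) (h : ¬ i < n) :
    pvLoopA cs n fuel paren instr schar esc i = i := by
  cases fuel <;> simp [pvLoopA, h]

theorem pvStopB (cs : List Char) (n : Int) (fuel : Nat) (paren i : Int) (h : ¬ i < n) :
    pvLoopB cs n fuel paren i = i := by
  cases fuel <;> simp [pvLoopB, h]

theorem pvStopStr (cs : List Char) (n : Int) (q : Char) (fuel : Nat) (i : Int) (h : ¬ i < n) :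
    pvStrLoop cs n q fuel i = i := by
  cases fuel <;> simp [pvStrLoop, h]

theorem pvStopJ (cs : List Char) (n : Int) (fuel : Nat) (j : Int) (h : ¬ j < n) :
    pvLoopJ cs n fuel j = j := by
  cases fuel <;> simp [pvLoopJ, h]

theorem pvStopW (cs : List Char) (n : Int) (fuel : Nat) (j : Int) (h : ¬ j < n) :
    pvWs cs n fuel j = j := by
  cases fuel <;> simp [pvWs, h]

-- one-step unfolding lemmas (the match is iota-reduced so later rewrites see plain ifs)
theorem pvStepA (cs : List Char) (n : Int) (fuel : Nat) (paren : Int) (instr : Bool)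
    (schar : Option Char) (esc : Bool) (i : Int) (c : Char)
    (hlt : i < n) (hc : PySem.List.pyGet? cs i = some c) :
    pvLoopA cs n (fuel + 1) paren instr schar esc i =
      (if esc then pvLoopA cs n fuel paren instr schar false (i + 1)
       else if c = '\\' then pvLoopA cs n fuel paren instr schar true (i + 1)
       else if (c = '"' ∨ c = '\'' ∨ c = '`') ∧ instr = false then
         pvLoopA cs n fuel paren true (some c) false (i + 1)
       else if some c = schar ∧ instr = true then
         pvLoopA cs n fuel paren false none false (i + 1)
       else if c = '(' ∧ instr = false then
         pvLoopA cs n fuel (paren + 1) instr schar false (i + 1)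
       else if c = ')' ∧ instr = false then
         if paren - 1 = 0 then
           let j := pvLoopJ cs n (n - (i + 1)).toNat (i + 1)
           if j < n ∧ PySem.List.pyGet? cs j = some ';' then j + 1 else i + 1
         else pvLoopA cs n fuel (paren - 1) instr schar false (i + 1)
       else pvLoopA cs n fuel paren instr schar false (i + 1)) := by
  simp only [pvLoopA]; rw [if_pos hlt, hc]

theorem pvStepB (cs : List Char) (n : Int) (fuel : Nat) (paren i : Int) (c : Char)
    (hlt : i < n) (hc : PySem.List.pyGet? cs i = some c) :
    pvLoopB cs n (fuel + 1) paren i =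
      (if c = '\\' then pvLoopB cs n fuel paren (if i + 1 < n then i + 2 else i + 1)
       else if c = '"' ∨ c = '\'' ∨ c = '`' then
         pvLoopB cs n fuel paren (pvStrLoop cs n c (n - (i + 1)).toNat (i + 1))
       else if c = '(' then pvLoopB cs n fuel (paren + 1) (i + 1)
       else if c = ')' then
         if paren - 1 = 0 then
           let j := pvWs cs n (n - (i + 1)).toNat (i + 1)
           if j < n ∧ PySem.List.pyGet? cs j = some ';' then j + 1 else i + 1
         else pvLoopB cs n fuel (paren - 1) (i + 1)
       else pvLoopB cs n fuel paren (i + 1)) := by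
  simp only [pvLoopB]; rw [if_pos hlt, hc]

theorem pvStepStr (cs : List Char) (n : Int) (q : Char) (fuel : Nat) (i : Int) (d : Char)
    (hlt : i < n) (hc : PySem.List.pyGet? cs i = some d) :
    pvStrLoop cs n q (fuel + 1) i =
      (if d = '\\' then pvStrLoop cs n q fuel (if i + 1 < n then i + 2 else i + 1)
       else if d = q then i + 1
       else pvStrLoop cs n q fuel (i + 1)) := by
  simp only [pvStrLoop]; rw [if_pos hlt, hc]

-- the two whitespace scans are the same loop (any sufficient fuels)
theorem pvWs_eq (cs : List Char) (n : Int) :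
    ∀ (f1 f2 : Nat) (j : Int), (n - j).toNat ≤ f1 → (n - j).toNat ≤ f2 →
      pvWs cs n f1 j = pvLoopJ cs n f2 j := by
  intro f1
  induction f1 with
  | zero =>
      intro f2 j h1 _
      have hj : ¬ j < n := by omega
      rw [pvStopW cs n 0 j hj, pvStopJ cs n f2 j hj]
  | succ f1 ih =>
      intro f2 j h1 h2
      by_cases hj : j < n
      · obtain ⟨g2, rfl⟩ : ∃ g, f2 = g + 1 := ⟨f2 - 1, by omega⟩
        simp only [pvWs, pvLoopJ, if_pos hj]
        cases hg : PySem.List.pyGet? cs j with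
        | none => rfl
        | some c =>
            show (if c = ' ' ∨ c = '\t' then pvWs cs n f1 (j + 1) else j)
              = (if c = ' ' ∨ c = '\t' then pvLoopJ cs n g2 (j + 1) else j)
            by_cases hsp : c = ' ' ∨ c = '\t'
            · rw [if_pos hsp, if_pos hsp]
              exact ih g2 (j + 1) (by omega) (by omega)
            · rw [if_neg hsp, if_neg hsp]
      · rw [pvStopW cs n _ j hj, pvStopJ cs n _ j hj]

-- main equivalence, one strong induction on the remaining length:
-- part 1: A's loop out of string state (no pending escape) = B's outer loop;
-- part 2: A's loop in string state (string_char = q) = B's outer loop resumed where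
--         B's inner loop closes the string — for ANY sufficient fuels on either side.
theorem pvMS (m : Nat) (cs : List Char) :
    (∀ (paren i : Int) (fa fb : Nat),
       ((cs.length : Int) - i).toNat ≤ m → ((cs.length : Int) - i).toNat ≤ fa →
       ((cs.length : Int) - i).toNat ≤ fb → -(cs.length : Int) ≤ i →
       pvLoopA cs cs.length fa paren false none false i = pvLoopB cs cs.length fb paren i) ∧
    (∀ (q : Char) (paren k : Int) (fa fs fb : Nat),
       ((cs.length : Int) - k).toNat ≤ m → ((cs.length : Int) - k).toNat ≤ fa →
       ((cs.length : Int) - k).toNat ≤ fs → ((cs.length : Int) - k).toNat ≤ fb →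
       -(cs.length : Int) ≤ k →
       pvLoopA cs cs.length fa paren true (some q) false k
         = pvLoopB cs cs.length fb paren (pvStrLoop cs cs.length q fs k)) := by
  induction m with
  | zero =>
      constructor
      · intro paren i fa fb hm _ _ _
        have h : ¬ i < (cs.length : Int) := by omega
        rw [pvStopA _ _ _ _ _ _ _ _ h, pvStopB _ _ _ _ _ h]
      · intro q paren k fa fs fb hm _ _ _ _
        have h : ¬ k < (cs.length : Int) := by omega
        rw [pvStopA _ _ _ _ _ _ _ _ h, pvStopStr _ _ _ _ _ h, pvStopB _ _ _ _ _ h]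
  | succ m ih =>
      constructor
      · -- part 1
        intro paren i fa fb hm hfa hfb hi
        by_cases hlt : i < (cs.length : Int)
        · obtain ⟨ga, rfl⟩ : ∃ g, fa = g + 1 := ⟨fa - 1, by omega⟩
          obtain ⟨gb, rfl⟩ : ∃ g, fb = g + 1 := ⟨fb - 1, by omega⟩
          obtain ⟨c, hc⟩ := pvGetSome cs i hi hlt
          rw [pvStepA _ _ _ _ _ _ _ _ _ hlt hc, pvStepB _ _ _ _ _ _ hlt hc]
          rw [if_neg (Bool.false_ne_true)]
          by_cases hb : c = '\\'
          · rw [if_pos hb, if_pos hb]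
            by_cases h2 : i + 1 < (cs.length : Int)
            · obtain ⟨ga', rfl⟩ : ∃ g, ga = g + 1 := ⟨ga - 1, by omega⟩
              obtain ⟨c2, hc2⟩ := pvGetSome cs (i + 1) (by omega) h2
              rw [pvStepA _ _ _ _ _ _ _ _ _ h2 hc2, if_pos rfl, if_pos h2,
                  show i + 1 + 1 = i + 2 by ring]
              exact ih.1 paren (i + 2) ga' gb (by omega) (by omega) (by omega) (by omega)
            · rw [pvStopA _ _ _ _ _ _ _ _ h2, if_neg h2, pvStopB _ _ _ _ _ h2]
          · rw [if_neg hb, if_neg hb]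
            by_cases hq : c = '"' ∨ c = '\'' ∨ c = '`'
            · rw [if_pos (show (c = '"' ∨ c = '\'' ∨ c = '`') ∧ (false : Bool) = false from
                    ⟨hq, rfl⟩), if_pos hq]
              exact ih.2 c paren (i + 1) ga ((cs.length : Int) - (i + 1)).toNat gb
                (by omega) (by omega) (by omega) (by omega) (by omega)
            · rw [if_neg (show ¬ ((c = '"' ∨ c = '\'' ∨ c = '`') ∧ (false : Bool) = false) by
                    simp [hq]),
                  if_neg (show ¬ (some c = (none : Option Char) ∧ (false : Bool) = true) by simp),
                  if_neg hq]
              by_cases ho : c = '('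
              · rw [if_pos (show c = '(' ∧ (false : Bool) = false from ⟨ho, rfl⟩), if_pos ho]
                exact ih.1 (paren + 1) (i + 1) ga gb (by omega) (by omega) (by omega) (by omega)
              · rw [if_neg (show ¬ (c = '(' ∧ (false : Bool) = false) by simp [ho]), if_neg ho]
                by_cases hcl : c = ')'
                · rw [if_pos (show c = ')' ∧ (false : Bool) = false from ⟨hcl, rfl⟩), if_pos hcl]
                  by_cases hz : paren - 1 = 0
                  · rw [if_pos hz, if_pos hz,
                        pvWs_eq cs (cs.length : Int) _ _ (i + 1) (le_refl _) (le_refl _)]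
                  · rw [if_neg hz, if_neg hz]
                    exact ih.1 (paren - 1) (i + 1) ga gb (by omega) (by omega) (by omega)
                      (by omega)
                · rw [if_neg (show ¬ (c = ')' ∧ (false : Bool) = false) by simp [hcl]),
                      if_neg hcl]
                  exact ih.1 paren (i + 1) ga gb (by omega) (by omega) (by omega) (by omega)
        · rw [pvStopA _ _ _ _ _ _ _ _ hlt, pvStopB _ _ _ _ _ hlt]
      · -- part 2
        intro q paren k fa fs fb hm hfa hfs hfb hk
        by_cases hlt : k < (cs.length : Int)
        · obtain ⟨ga, rfl⟩ : ∃ g, fa = g + 1 := ⟨fa - 1, by omega⟩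
          obtain ⟨gs, rfl⟩ : ∃ g, fs = g + 1 := ⟨fs - 1, by omega⟩
          obtain ⟨c, hc⟩ := pvGetSome cs k hk hlt
          rw [pvStepA _ _ _ _ _ _ _ _ _ hlt hc, pvStepStr _ _ _ _ _ _ hlt hc]
          rw [if_neg (Bool.false_ne_true)]
          by_cases hb : c = '\\'
          · rw [if_pos hb, if_pos hb]
            by_cases h2 : k + 1 < (cs.length : Int)
            · obtain ⟨ga', rfl⟩ : ∃ g, ga = g + 1 := ⟨ga - 1, by omega⟩
              obtain ⟨c2, hc2⟩ := pvGetSome cs (k + 1) (by omega) h2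
              rw [pvStepA _ _ _ _ _ _ _ _ _ h2 hc2, if_pos rfl, if_pos h2,
                  show k + 1 + 1 = k + 2 by ring]
              exact ih.2 q paren (k + 2) ga' gs fb (by omega) (by omega) (by omega) (by omega)
                (by omega)
            · rw [pvStopA _ _ _ _ _ _ _ _ h2, if_neg h2, pvStopStr _ _ _ _ _ h2,
                  pvStopB _ _ _ _ _ h2]
          · rw [if_neg hb, if_neg hb]
            by_cases hq : c = q
            · rw [if_pos hq,
                  if_neg (show ¬ ((c = '"' ∨ c = '\'' ∨ c = '`') ∧ (true : Bool) = false) by simp),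
                  if_pos (show some c = some q ∧ (true : Bool) = true by simp [hq])]
              exact ih.1 paren (k + 1) ga fb (by omega) (by omega) (by omega) (by omega)
            · rw [if_neg hq,
                  if_neg (show ¬ ((c = '"' ∨ c = '\'' ∨ c = '`') ∧ (true : Bool) = false) by simp),
                  if_neg (show ¬ (some c = some q ∧ (true : Bool) = true) by simp [hq]),
                  if_neg (show ¬ (c = '(' ∧ (true : Bool) = false) by simp),
                  if_neg (show ¬ (c = ')' ∧ (true : Bool) = false) by simp)]
              exact ih.2 q paren (k + 1) ga gs fb (by omega) (by omega) (by omega) (by omega)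
                (by omega)
        · rw [pvStopA _ _ _ _ _ _ _ _ hlt, pvStopStr _ _ _ _ _ hlt, pvStopB _ _ _ _ _ hlt]

-- ===== VERDICT (by name: the statement is the Claim_ definition above) =====
theorem find_statement_end_spec : Claim_equal_find_statement_end := by
  intro content start_pos _hdom hpre
  unfold Spec_find_statement_end find_statement_end find_statement_end_alt
  exact (pvMS ((content.toList.length : Int) - start_pos).toNat content.toList).1 0 start_pos
    _ _ (le_refl _) (le_refl _) (le_refl _) hpre
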